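-- pv_equiv track=rewrite | github.com/min9nim/python-study | selected/2022-01-24-long-pressed-name.py | isLongPressedName
-- ===== SOURCE A (Python) =====
-- def isLongPressedName(name: str, typed: str) -> bool:
--     repeatedStr = ''
--     size = len(name)
--     for i, v in enumerate(name):
--         repeatedStr += v
--         if i < size-1 and name[i+1] == v:
--             continue
--         else:
--             if repeatedStr == typed[0:len(repeatedStr)]:
--                 typed = typed[len(repeatedStr):]
--                 while typed != '' and typed[0] == v:
--                     typed = typed[1:]
--                 repeatedStr = ''
--             else:
--                 return False
--     return typed == ''
-- ===== SOURCE B (Python) =====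
-- def isLongPressedName(name: str, typed: str) -> bool:
--     i = 0
--     prev = None
--     for c in typed:
--         if i < len(name) and name[i] == c:
--             i += 1
--         elif c != prev:
--             return False
--         prev = c
--     return i == len(name)
-- ===== Notes on version B (the rewrite author's own statement) =====
-- stated objective: faster
-- what changed: Replaced A's run-accumulating scan (which builds a repeated-prefix string and repeatedly slices/reassigns `typed`) with a single two-pointer pass over `typed` that advances a pointer into `name` on a match and skips repeats of the previous typed char.
import Mathlib
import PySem

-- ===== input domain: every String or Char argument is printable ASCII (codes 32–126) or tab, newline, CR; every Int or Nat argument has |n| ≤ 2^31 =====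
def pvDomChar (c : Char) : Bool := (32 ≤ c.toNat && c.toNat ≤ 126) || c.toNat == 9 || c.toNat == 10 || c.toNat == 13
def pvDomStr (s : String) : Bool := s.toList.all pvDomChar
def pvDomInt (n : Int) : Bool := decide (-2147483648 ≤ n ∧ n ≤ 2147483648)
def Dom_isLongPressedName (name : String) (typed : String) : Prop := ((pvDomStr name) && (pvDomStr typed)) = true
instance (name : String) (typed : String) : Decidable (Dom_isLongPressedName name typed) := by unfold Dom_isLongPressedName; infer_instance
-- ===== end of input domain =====

-- B replaces A's run-accumulation with string slicing (O(n^2)) by a single two-pointer pass (O(n)); return values are proved equal on all inputs.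

-- ===== PORT A =====
-- transliteration of A's inner `while typed != '' and typed[0] == v: typed = typed[1:]`
def stripA (v : Char) : List Char → List Char
  | [] => []
  | c :: ts => if c = v then stripA v ts else c :: ts

-- the for-loop over `name`; first argument is the remaining suffix of `name`
-- (so `i < size-1 and name[i+1] == v` becomes a look at the suffix's head),
-- second is `repeatedStr`, third the current value of the mutable `typed`.
def goA : List Char → List Char → List Char → Bool
  | [], _rep, typed => typed.isEmpty
  | v :: rest, rep, typed =>
    let rep' := rep ++ [v]
    if (match rest with | w :: _ => w == v | [] => false) then
      goA rest rep' typed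
    else if rep' = typed.take rep'.length then
      goA rest [] (stripA v (typed.drop rep'.length))
    else
      false

def isLongPressedName (name : String) (typed : String) : Bool :=
  goA name.toList [] typed.toList

-- ===== PORT B =====
-- the for-loop over `typed`; first argument is the remaining suffix of `name`
-- (the pointer i), second is `prev`, third the remaining suffix of `typed`.
def goB : List Char → Option Char → List Char → Bool
  | nrem, _, [] => nrem.isEmpty
  | n0 :: nrest, prev, c :: ts =>
    if n0 = c then goB nrest (some c) ts
    else if prev = some c then goB (n0 :: nrest) (some c) ts
    else false
  | [], prev, c :: ts =>
    if prev = some c then goB [] (some c) ts else false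

def isLongPressedName_alt (name : String) (typed : String) : Bool :=
  goB name.toList none typed.toList

-- ===== PRECONDITION & SPEC =====
def Spec_isLongPressedName (name : String) (typed : String) (out : Bool) : Prop := out = isLongPressedName_alt name typed
instance (name : String) (typed : String) (out : Bool) : Decidable (Spec_isLongPressedName name typed out) := by unfold Spec_isLongPressedName; infer_instance

-- ===== CLAIM (what is proved, stated in full; the proofs are below) =====
def Claim_equal_isLongPressedName : Prop := ∀ (name : String) (typed : String), Dom_isLongPressedName name typed → Spec_isLongPressedName name typed (isLongPressedName name typed)

-- ===== LEMMAS AND PROOFS =====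

theorem stripA_eq_dropWhile (v : Char) (t : List Char) :
    stripA v t = t.dropWhile (· = v) := by
  induction t with
  | nil => rfl
  | cons c ts ih =>
    simp only [stripA, List.dropWhile]
    by_cases h : c = v <;> simp [h, ih]

-- prev-irrelevance: if prev can never match the first typed char, it is as good as none
theorem goB_prev_none (n : List Char) (t : List Char) (p : Option Char)
    (h : ∀ c, t.head? = some c → p ≠ some c) :
    goB n p t = goB n none t := by
  cases t with
  | nil => cases n <;> rfl
  | cons c ts =>
    have hp : p ≠ some c := h c rfl
    cases n with
    | nil => simp [goB, hp]
    | cons n0 nrest =>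
      by_cases hm : n0 = c <;> simp [goB, hm, hp]

theorem take_eq_replicate_iff (v : Char) (t : List Char) (n : Nat) :
    (t.take n = List.replicate n v) ↔ n ≤ (t.takeWhile (· = v)).length := by
  induction t generalizing n with
  | nil =>
    cases n <;> simp [List.replicate_succ]
  | cons c ts ih =>
    cases n with
    | zero => simp
    | succ m =>
      by_cases h : c = v
      · rw [List.replicate_succ]
        simp [List.takeWhile_cons, h, ih]
      · rw [List.replicate_succ]
        simp [List.takeWhile_cons, h]

theorem drop_dropWhile (v : Char) (t : List Char) (n : Nat)
    (h : n ≤ (t.takeWhile (· = v)).length) :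
    (t.drop n).dropWhile (· = v) = t.dropWhile (· = v) := by
  induction t generalizing n with
  | nil => simp
  | cons c ts ih =>
    cases n with
    | zero => simp
    | succ m =>
      by_cases hc : c = v
      · simp only [List.takeWhile] at h
        simp [hc] at h
        simp [List.drop, List.dropWhile, hc, ih m h]
      · simp [List.takeWhile, hc] at h

theorem head?_dropWhile_ne (v : Char) (t : List Char) :
    ∀ c, (t.dropWhile (· = v)).head? = some c → c ≠ v := by
  induction t with
  | nil => intro c h; simp at h
  | cons a ts ih =>
    intro c h
    by_cases ha : a = v
    · exact ih c (by simpa [List.dropWhile, ha] using h)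
    · simp [List.dropWhile, ha] at h
      exact h ▸ ha

theorem goA_run (v : Char) (k : Nat) (rest : List Char)
    (hrest : ∀ w, rest.head? = some w → w ≠ v) :
    ∀ (rep t : List Char),
    goA (List.replicate (k + 1) v ++ rest) rep t =
      if rep ++ List.replicate (k + 1) v = t.take (rep.length + (k + 1)) then
        goA rest [] (stripA v (t.drop (rep.length + (k + 1))))
      else false := by
  induction k with
  | zero =>
    intro rep t
    cases rest with
    | nil =>
      simp only [List.replicate, List.singleton_append, goA]
      simp
    | cons w ws =>
      have hw : (w == v) = false := by simpa using hrest w rfl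
      simp only [List.replicate, List.singleton_append, goA, hw]
      simp
  | succ m ih =>
    intro rep t
    have : List.replicate (m + 1 + 1) v ++ rest = v :: (List.replicate (m + 1) v ++ rest) := by
      simp [List.replicate_succ]
    rw [this]
    have hhead : (match List.replicate (m + 1) v ++ rest with
        | w :: _ => w == v | [] => false) = true := by
      simp [List.replicate_succ]
    simp only [goA, hhead, if_true]
    rw [ih (rep ++ [v]) t]
    have h1 : (rep ++ [v]) ++ List.replicate (m + 1) v = rep ++ List.replicate (m + 1 + 1) v := by
      simp [List.replicate_succ, List.append_assoc]
    have h2 : (rep ++ [v]).length + (m + 1) = rep.length + (m + 1 + 1) := by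
      simp; omega
    rw [h1, h2]

theorem goB_run (v : Char) (rest : List Char)
    (hrest : ∀ w, rest.head? = some w → w ≠ v) :
    ∀ (t : List Char) (k : Nat) (p : Option Char),
    (k = 0 → p = some v) → (p = none ∨ p = some v) →
    goB (List.replicate k v ++ rest) p t =
      if k ≤ (t.takeWhile (· = v)).length then
        goB rest (some v) (t.dropWhile (· = v))
      else false := by
  intro t
  induction t with
  | nil =>
    intro k p _ _
    cases k with
    | zero => cases rest <;> simp [goB]
    | succ m => simp [goB, List.replicate_succ]
  | cons c ts ih =>
    intro k p hk0 hp
    by_cases hc : c = v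
    · subst hc
      cases k with
      | zero =>
        have hpv : p = some c := hk0 rfl
        have hrne : ∀ n0 nrest, rest = n0 :: nrest → n0 ≠ c := by
          intro n0 nrest hr; exact hrest n0 (by simp [hr])
        have step : goB rest p (c :: ts) = goB rest (some c) ts := by
          cases rest with
          | nil => simp [goB, hpv]
          | cons n0 nrest =>
            have := hrne n0 nrest rfl
            simp [goB, this, hpv]
        simpa [step, List.takeWhile_cons, List.dropWhile_cons] using
          ih 0 (some c) (fun _ => rfl) (Or.inr rfl)
      | succ m =>
        have : List.replicate (m + 1) c ++ rest = c :: (List.replicate m c ++ rest) := by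
          simp [List.replicate_succ]
        rw [this]
        simp only [goB, if_pos rfl]
        by_cases hm : m = 0
        · subst hm
          simpa [List.takeWhile_cons, List.dropWhile_cons] using
            ih 0 (some c) (fun _ => rfl) (Or.inr rfl)
        · have := ih m (some c) (fun h => absurd h hm) (Or.inr rfl)
          simpa [List.takeWhile_cons, List.dropWhile_cons] using this
    · cases k with
      | zero =>
        have hpv : p = some v := hk0 rfl
        have hcond : (0 ≤ ((c :: ts).takeWhile (· = v)).length) := Nat.zero_le _
        rw [if_pos hcond]
        have hdw : (c :: ts).dropWhile (· = v) = c :: ts := by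
          simp [List.dropWhile_cons, hc]
        rw [hdw, hpv]
        simp
      | succ m =>
        have : List.replicate (m + 1) v ++ rest = v :: (List.replicate m v ++ rest) := by
          simp [List.replicate_succ]
        rw [this]
        have hvc : ¬ v = c := fun h => hc h.symm
        have hpc : p ≠ some c := by
          rcases hp with h | h <;> simp [h]
          exact fun h' => hc h'.symm
        have hcond : ¬ (m + 1 ≤ ((c :: ts).takeWhile (· = v)).length) := by
          simp [List.takeWhile_cons, hc]
        rw [if_neg hcond]
        simp [goB, hvc, hpc]

theorem goA_eq_goB : ∀ (L : Nat) (name : List Char), name.length ≤ L →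
    ∀ t, goA name [] t = goB name none t := by
  intro L
  induction L with
  | zero =>
    intro name hlen t
    have : name = [] := List.eq_nil_of_length_eq_zero (Nat.le_zero.mp hlen)
    subst this
    cases t <;> simp [goA, goB]
  | succ M ih =>
    intro name hlen t
    cases name with
    | nil => cases t <;> simp [goA, goB]
    | cons v ns =>
      have hsplit : v :: ns = List.replicate ((ns.takeWhile (· = v)).length + 1) v ++ ns.dropWhile (· = v) := by
        have h1 : ns.takeWhile (· = v) = List.replicate (ns.takeWhile (· = v)).length v := by
          apply List.eq_replicate_of_mem
          intro b hb
          have := List.mem_takeWhile_imp hb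
          simpa using this
        calc v :: ns = v :: (ns.takeWhile (· = v) ++ ns.dropWhile (· = v)) := by
              rw [List.takeWhile_append_dropWhile]
          _ = _ := by
              rw [List.replicate_succ, List.cons_append]
              congr 1
              rw [← h1]
      set k : Nat := (ns.takeWhile (· = v)).length with hk
      set rest : List Char := ns.dropWhile (· = v) with hrdef
      have hrest : ∀ w, rest.head? = some w → w ≠ v := by
        intro w hw
        exact head?_dropWhile_ne v ns w (hrdef ▸ hw)
      rw [hsplit]
      rw [goA_run v k rest hrest [] t]
      rw [goB_run v rest hrest t (k + 1) none (by simp) (Or.inl rfl)]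
      have hcond : ([] ++ List.replicate (k + 1) v = t.take (([] : List Char).length + (k + 1)))
          ↔ (k + 1 ≤ (t.takeWhile (· = v)).length) := by
        simp only [List.nil_append, List.length_nil, Nat.zero_add]
        rw [eq_comm]
        exact take_eq_replicate_iff v t (k + 1)
      by_cases hle : k + 1 ≤ (t.takeWhile (· = v)).length
      · rw [if_pos (hcond.mpr hle), if_pos hle]
        rw [stripA_eq_dropWhile]
        simp only [List.length_nil, Nat.zero_add]
        rw [drop_dropWhile v t (k + 1) hle]
        rw [goB_prev_none rest _ (some v) (by
          intro c hc hvc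
          have := head?_dropWhile_ne v t c hc
          simp at hvc
          exact this hvc.symm)]
        have hrlen : rest.length ≤ M := by
          have h2 : rest.length ≤ ns.length := by
            rw [hrdef]; exact List.length_dropWhile_le _ _
          simp at hlen
          omega
        exact ih rest hrlen (t.dropWhile (· = v))
      · rw [if_neg (fun h => hle (hcond.mp h)), if_neg hle]

theorem goA_strings (name typed : String) :
    isLongPressedName name typed = isLongPressedName_alt name typed := by
  unfold isLongPressedName isLongPressedName_alt
  exact goA_eq_goB name.toList.length name.toList (Nat.le_refl _) typed.toList

-- ===== VERDICT (by name: the statement is the Claim_ definition above) =====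
theorem isLongPressedName_spec : Claim_equal_isLongPressedName := by
  intro name typed _
  unfold Spec_isLongPressedName
  exact goA_strings name typed
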